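-- pv_equiv track=rewrite | github.com/Satoru577/Reversi_game | player.py | chang_L
-- ===== SOURCE A (Python) =====
-- BLACK = (0, 0, 0)
--
-- WHITE = (255, 255, 255)
--
-- def chang_L(cells, idx_v, idx_h, count, can_put, color):
--     judg_flag = True
--     while judg_flag:
--         idx_U = idx_h - 1
--         if  0 <= idx_U <= 7:
--             judg = count
--             if cells[idx_v][idx_U][3] == WHITE:
--                 count -= 1
--             elif cells[idx_v][idx_U][3] == BLACK:
--                 count += 1
--             else:
--                 judg_flag = False
--                 continue
--             if count == 0:
--                 judg_flag = False
--                 continue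
--
--             if abs(judg) < abs(count):
--                 can_put = chang_L(cells, idx_v, idx_U, count, can_put, color)
--             elif abs(judg) > abs(count):
--                 can_put = 1
--             else:
--                 can_put = 0
--             judg_flag = False
--         else:
--             judg_flag = False
--     if can_put == 1:
--         cells[idx_v][idx_U][3] = color
--     return can_put
-- ===== SOURCE B (Python) =====
-- BLACK = (0, 0, 0)
--
-- WHITE = (255, 255, 255)
--
--
-- def chang_L(cells, idx_v, idx_h, count, can_put, color):
--     # One iterative leftward walk; every visited index is recorded and all
--     # flips are applied in a single pass after the walk (A instead recurses,
--     # each recursion level writing its own cell on the way back up).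
--     result = can_put
--     passed = []
--     cur = idx_h
--     while True:
--         u = cur - 1
--         passed.append(u)
--         if not (0 <= u <= 7):
--             break
--         c = cells[idx_v][u][3]
--         delta = -1 if c == WHITE else (1 if c == BLACK else 0)
--         if delta == 0:          # empty cell: chain is open, keep incoming result
--             break
--         prev = count
--         count += delta
--         if count == 0:
--             break
--         if abs(prev) < abs(count):
--             cur = u             # still moving away from zero: keep walking left
--         elif abs(prev) > abs(count):
--             result = 1          # turned back toward zero: the line closes here
--             break
--         else:
--             result = 0
--             break
--     if result == 1:
--         for u in passed:
--             cells[idx_v][u][3] = color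
--     return result
-- ===== Notes on version B (the rewrite author's own statement) =====
-- stated objective: alternative
-- what changed: Replaces A's self-recursion, whose every level re-checks the final can_put and writes its own cell on the way back up, with a single iterative leftward loop that records the visited indices and applies all flips in one final pass.
-- outside the precondition, e.g. on chang_L([[[(0, 0, 0)]]], 0, 2, 0, 1, (1, 2, 3)): A raises IndexError, B raises IndexError
import Mathlib
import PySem

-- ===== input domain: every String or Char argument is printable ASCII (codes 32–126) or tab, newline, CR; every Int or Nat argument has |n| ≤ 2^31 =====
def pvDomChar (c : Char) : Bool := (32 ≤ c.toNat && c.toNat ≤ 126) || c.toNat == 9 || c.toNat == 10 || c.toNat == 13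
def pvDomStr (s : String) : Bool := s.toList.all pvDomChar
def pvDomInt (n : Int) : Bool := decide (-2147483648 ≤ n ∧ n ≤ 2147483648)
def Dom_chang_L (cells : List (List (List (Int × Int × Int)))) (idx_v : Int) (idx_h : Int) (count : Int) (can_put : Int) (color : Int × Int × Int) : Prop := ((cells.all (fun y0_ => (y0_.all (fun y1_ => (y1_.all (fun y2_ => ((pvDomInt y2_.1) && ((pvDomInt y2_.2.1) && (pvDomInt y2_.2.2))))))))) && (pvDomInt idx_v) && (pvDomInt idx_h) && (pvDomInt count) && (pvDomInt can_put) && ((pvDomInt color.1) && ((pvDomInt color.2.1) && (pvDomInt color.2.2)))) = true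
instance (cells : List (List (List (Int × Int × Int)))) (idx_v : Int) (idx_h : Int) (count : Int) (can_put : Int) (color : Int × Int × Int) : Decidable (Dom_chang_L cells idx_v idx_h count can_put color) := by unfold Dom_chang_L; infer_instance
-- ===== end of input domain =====

-- B replaces A's self-recursion (each level writing its own cell) with one iterative
-- leftward loop plus a single final flip pass; A and B both mutate `cells` in place
-- identically, and the equivalence proved here is about the RETURN value only.


-- cells[idx_v][u][3], Python indexing (negative from the end); default is irrelevant:
-- Pre_ guarantees the lookup succeeds whenever it is reached.
def pvCell (cells : List (List (List (Int × Int × Int)))) (v u : Int) : Int × Int × Int :=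
  (PySem.List.pyGet? ((PySem.List.pyGet? ((PySem.List.pyGet? cells v).getD []) u).getD []) 3).getD (-1, -1, -1)

-- ===== PORT A =====
-- A's `while judg_flag` body runs exactly once (every branch clears the flag), so it is
-- transliterated as a straight-line block; the shared tail after the WHITE/BLACK `elif`
-- is duplicated into both branches (Lean has no fallthrough).  The final in-place write
-- `cells[idx_v][idx_U][3] = color` does not affect the returned value and is not modelled.
def chang_L (cells : List (List (List (Int × Int × Int)))) (idx_v : Int) (idx_h : Int) (count : Int) (can_put : Int) (color : Int × Int × Int) : Int :=
  let idx_U := idx_h - 1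
  if hU : 0 ≤ idx_U ∧ idx_U ≤ 7 then
    let judg := count
    if pvCell cells idx_v idx_U = (255, 255, 255) then
      let count := count - 1
      if count = 0 then can_put
      else if |judg| < |count| then chang_L cells idx_v idx_U count can_put color
      else if |judg| > |count| then 1
      else 0
    else if pvCell cells idx_v idx_U = (0, 0, 0) then
      let count := count + 1
      if count = 0 then can_put
      else if |judg| < |count| then chang_L cells idx_v idx_U count can_put color
      else if |judg| > |count| then 1
      else 0
    else can_put
  else can_put
termination_by idx_h.toNat
decreasing_by all_goals omega

-- ===== PORT B =====
-- Source B's `while True` loop; `passed` and the final flip pass only mutate `cells`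
-- and never influence the returned `result`, so they are not modelled.
def pvLoop (cells : List (List (List (Int × Int × Int)))) (idx_v : Int) (cur count result : Int) : Int :=
  let u := cur - 1
  if _hU : 0 ≤ u ∧ u ≤ 7 then
    let c := pvCell cells idx_v u
    let delta : Int := if c = (255, 255, 255) then -1 else if c = (0, 0, 0) then 1 else 0
    if delta = 0 then result
    else
      let prev := count
      let count := count + delta
      if count = 0 then result
      else if |prev| < |count| then pvLoop cells idx_v u count result
      else if |prev| > |count| then 1
      else 0
  else result
termination_by cur.toNat
decreasing_by all_goals omega

def chang_L_alt (cells : List (List (List (Int × Int × Int)))) (idx_v : Int) (idx_h : Int) (count : Int) (can_put : Int) (color : Int × Int × Int) : Int :=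
  pvLoop cells idx_v idx_h count can_put

-- ===== PRECONDITION & SPEC =====
-- Pre_ excludes the inputs on which Python A raises IndexError (an out-of-range read of
-- cells[idx_v][u][3] during the walk, or an out-of-range final write when can_put == 1),
-- and, conservatively, ragged boards (rows shorter than 8 or cells shorter than 4) on
-- which A can happen to return when the walk stops before reaching the short part;
-- B behaves exactly like A on those excluded returning inputs.
def Pre_chang_L (cells : List (List (List (Int × Int × Int)))) (idx_v : Int) (idx_h : Int) (count : Int) (can_put : Int) (color : Int × Int × Int) : Prop :=
  let u := idx_h - 1
  let row := (PySem.List.pyGet? cells idx_v).getD []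
  if 0 ≤ u ∧ u ≤ 7 then
    8 ≤ row.length ∧ ∀ c ∈ row, 4 ≤ c.length
  else
    can_put ≠ 1 ∨ 4 ≤ (((PySem.List.pyGet? row u).getD [])).length
instance (cells : List (List (List (Int × Int × Int)))) (idx_v : Int) (idx_h : Int) (count : Int) (can_put : Int) (color : Int × Int × Int) : Decidable (Pre_chang_L cells idx_v idx_h count can_put color) := by unfold Pre_chang_L; infer_instance

def pvWitness_chang_L : (List (List (List (Int × Int × Int)))) × Int × Int × Int × Int × (Int × Int × Int) :=
  ([[[(0,0,0),(0,0,0),(0,0,0),(255,255,255)]]], 0, 0, 0, 0, (0, 0, 0))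

def Spec_chang_L (cells : List (List (List (Int × Int × Int)))) (idx_v : Int) (idx_h : Int) (count : Int) (can_put : Int) (color : Int × Int × Int) (out : Int) : Prop := out = chang_L_alt cells idx_v idx_h count can_put color
instance (cells : List (List (List (Int × Int × Int)))) (idx_v : Int) (idx_h : Int) (count : Int) (can_put : Int) (color : Int × Int × Int) (out : Int) : Decidable (Spec_chang_L cells idx_v idx_h count can_put color out) := by unfold Spec_chang_L; infer_instance

-- ===== CLAIM (what is proved, stated in full; the proofs are below) =====
def Claim_equal_chang_L : Prop := ∀ (cells : List (List (List (Int × Int × Int)))) (idx_v : Int) (idx_h : Int) (count : Int) (can_put : Int) (color : Int × Int × Int), Dom_chang_L cells idx_v idx_h count can_put color → Pre_chang_L cells idx_v idx_h count can_put color → Spec_chang_L cells idx_v idx_h count can_put color (chang_L cells idx_v idx_h count can_put color)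

-- ===== LEMMAS AND PROOFS =====

-- The two ports agree on ALL inputs (Pre_ is only needed because Python A raises).
theorem chang_L_eq_loop (n : Nat) : ∀ (cells : List (List (List (Int × Int × Int)))) (idx_v idx_h count can_put : Int) (color : Int × Int × Int), idx_h.toNat ≤ n → chang_L cells idx_v idx_h count can_put color = pvLoop cells idx_v idx_h count can_put := by
  induction n with
  | zero =>
    intro cells idx_v idx_h count can_put color hn
    rw [chang_L, pvLoop]
    split_ifs with h <;> first | rfl | omega
  | succ n ih =>
    intro cells idx_v idx_h count can_put color hn
    rw [chang_L, pvLoop]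
    by_cases hU : 0 ≤ idx_h - 1 ∧ idx_h - 1 ≤ 7
    · simp only [dif_pos hU]
      have hrec : (idx_h - 1).toNat ≤ n := by omega
      by_cases hw : pvCell cells idx_v (idx_h - 1) = (255, 255, 255)
      · simp only [if_pos hw]
        have : ¬ ((-1 : Int) = 0) := by decide
        simp only [this, if_false, Int.add_neg_one]
        split_ifs with h1 h2 h3 <;>
          first
          | rfl
          | { exact ih cells idx_v (idx_h - 1) (count + -1) can_put color hrec }
      · simp only [if_neg hw]
        by_cases hb : pvCell cells idx_v (idx_h - 1) = (0, 0, 0)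
        · simp only [if_pos hb]
          have : ¬ ((1 : Int) = 0) := by decide
          simp only [this, if_false]
          split_ifs with h1 h2 h3 <;>
            first
            | rfl
            | { exact ih cells idx_v (idx_h - 1) (count + 1) can_put color hrec }
        · simp [if_neg hb]
    · simp only [dif_neg hU]

-- ===== VERDICT (by name: the statement is the Claim_ definition above) =====
theorem chang_L_spec : Claim_equal_chang_L := by
  intro cells idx_v idx_h count can_put color _ _
  unfold Spec_chang_L chang_L_alt
  exact chang_L_eq_loop idx_h.toNat cells idx_v idx_h count can_put color le_rfl
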